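-- pv_equiv track=rewrite | github.com/kazuhiko1979/edabit | 126_hard_Smallest Transform.py | smallest_transform
-- ===== SOURCE A (Python) =====
-- def smallest_transform(num):
--
-- 	matches_num = [i * len(str(num)) for i in set(list(str(num)))]
-- 	candidates = [str(num) for _ in range(len(matches_num))]
--
-- 	flat_list = []
-- 	sub_result = []
--
-- 	for match, candidate in zip(matches_num, candidates):
-- 		for i in range(0, len(match)):
-- 			sub_result.append(abs(int(match[i]) - int(candidate[i])))
-- 			if i == len(match) - 1:
-- 				flat_list.append(sum(sub_result))
-- 				sub_result = []
-- 	return min(flat_list)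
-- ===== SOURCE B (Python) =====
-- def smallest_transform(num):
--     cnt = {}
--     for ch in str(num):
--         cnt[ch] = cnt.get(ch, 0) + 1
--     return min(
--         sum(n * abs(int(g) - int(c)) for g, n in cnt.items())
--         for c in cnt
--     )
-- ===== Notes on version B (the rewrite author's own statement) =====
-- stated objective: simpler
-- what changed: B builds a character-frequency table of str(num) once and computes each candidate's cost as a weighted sum over distinct characters, instead of materialising per-candidate repeated strings and re-scanning the whole string with an index loop per candidate.
import Mathlib
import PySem

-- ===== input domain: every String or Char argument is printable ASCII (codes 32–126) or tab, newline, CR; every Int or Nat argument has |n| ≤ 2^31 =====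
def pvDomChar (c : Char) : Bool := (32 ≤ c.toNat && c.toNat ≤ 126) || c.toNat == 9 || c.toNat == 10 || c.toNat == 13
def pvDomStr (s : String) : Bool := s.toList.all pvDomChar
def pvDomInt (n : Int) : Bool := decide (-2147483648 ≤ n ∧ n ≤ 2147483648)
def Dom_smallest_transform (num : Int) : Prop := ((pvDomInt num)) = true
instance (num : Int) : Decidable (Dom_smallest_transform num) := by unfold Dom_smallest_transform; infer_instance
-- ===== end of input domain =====

-- B replaces A's per-candidate repeated strings and index loop by a frequency table and a
-- weighted sum over distinct characters (objective: simpler).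

-- int(c) for a one-character string c; used by both ports (Pre_ keeps both Pythons where it succeeds)
def pyInt1 (c : Char) : Int := (PySem.Int.ofChars? [c]).getD 0

-- ===== PORT A =====
def smallest_transform (num : Int) : Int :=
  let s := PySem.Int.toChars num
  let matches_num := (PySem.Set.ofList s).map (fun c => List.replicate s.length c)
  let candidates := (PySem.List.pyRange 0 matches_num.length).map (fun _ => s)
  let st :=
    (matches_num.zip candidates).foldl
      (fun (st : List Int × List Int) mc =>
        (PySem.List.pyRange 0 mc.1.length).foldl
          (fun st i =>
            let sub := st.2 ++ [|pyInt1 (PySem.List.pyGetD mc.1 i ' ') - pyInt1 (PySem.List.pyGetD mc.2 i ' ')|]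
            if i == (mc.1.length : Int) - 1 then (st.1 ++ [sub.sum], []) else (st.1, sub))
          st)
      ([], [])
  (PySem.List.min? st.1 id).getD 0

-- ===== PORT B =====
def smallest_transform_alt (num : Int) : Int :=
  let s := PySem.Int.toChars num
  let cnt : PySem.Dict Char Int :=
    s.foldl (fun d x => d.insert x (d.getD x 0 + 1)) PySem.Dict.empty
  let costs := cnt.keys.map (fun c => (cnt.items.map (fun p => p.2 * |pyInt1 p.1 - pyInt1 c|)).sum)
  (PySem.List.min? costs id).getD 0

-- ===== PRECONDITION & SPEC =====
-- Pre_ excludes negative inputs: there str(num) contains a minus sign, so both Pythons raise ValueError in int().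
def Pre_smallest_transform (num : Int) : Prop := 0 ≤ num
instance (num : Int) : Decidable (Pre_smallest_transform num) := by unfold Pre_smallest_transform; infer_instance
def pvWitness_smallest_transform : Int := 1337

def Spec_smallest_transform (num : Int) (out : Int) : Prop := out = smallest_transform_alt num
instance (num : Int) (out : Int) : Decidable (Spec_smallest_transform num out) := by unfold Spec_smallest_transform; infer_instance

-- ===== CLAIM (what is proved, stated in full; the proofs are below) =====
def Claim_equal_smallest_transform : Prop := ∀ (num : Int), Dom_smallest_transform num → Pre_smallest_transform num → Spec_smallest_transform num (smallest_transform num)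

-- ===== LEMMAS AND PROOFS =====

theorem pv_toDigitsCore_ne_nil (b : Nat) : ∀ (fuel n : Nat) (acc : List Char),
    (fuel ≠ 0 ∨ acc ≠ []) → Nat.toDigitsCore b fuel n acc ≠ []
  | 0, n, acc, h => by
      simpa [Nat.toDigitsCore] using h.resolve_left (by simp)
  | fuel + 1, n, acc, _ => by
      rw [Nat.toDigitsCore]
      split
      · simp
      · exact pv_toDigitsCore_ne_nil b fuel (n / b) _ (Or.inr (by simp))

theorem pv_toChars_ne_nil (n : Int) : PySem.Int.toChars n ≠ [] := by
  unfold PySem.Int.toChars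
  split
  · simp
  · exact pv_toDigitsCore_ne_nil 10 _ _ _ (Or.inl (by simp))

theorem pv_zip_map {α : Type} (f : α → List Char) (s0 : List Char) :
    ∀ (l : List α) (n : Nat), l.length ≤ n →
      (l.map f).zip (List.replicate n s0) = l.map (fun c => (f c, s0))
  | [], _, _ => by simp
  | a :: l, n + 1, h => by
      rw [List.replicate_succ]
      simp only [List.map_cons, List.zip_cons_cons, pv_zip_map f s0 l n (by simpa using h)]
  | a :: l, 0, h => by simp at h

theorem pv_foldl_pair (F : (List Int × List Int) → Char → (List Int × List Int)) (cost : Char → Int)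
    (hF : ∀ fl x, F (fl, []) x = (fl ++ [cost x], [])) :
    ∀ (D : List Char) (fl : List Int), D.foldl F (fl, []) = (fl ++ D.map cost, [])
  | [], fl => by simp
  | x :: D, fl => by
      simp only [List.foldl_cons, hF, pv_foldl_pair F cost hF D, List.map_cons, List.append_assoc,
        List.singleton_append]

theorem pv_accum (s : List Char) (c : Char) :
    ∀ (m : Nat), m < s.length → ∀ (fl sub : List Int),
      (PySem.List.pyRange 0 (m : Int)).foldl
        (fun st i =>
          let sub := st.2 ++ [|pyInt1 (PySem.List.pyGetD (List.replicate s.length c) i ' ') -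
            pyInt1 (PySem.List.pyGetD s i ' ')|]
          if i == ((List.replicate s.length c).length : Int) - 1 then (st.1 ++ [sub.sum], ([] : List Int))
          else (st.1, sub))
        (fl, sub)
      = (fl, sub ++ (PySem.List.pyRange 0 (m : Int)).map
          (fun i => |pyInt1 (PySem.List.pyGetD (List.replicate s.length c) i ' ') -
            pyInt1 (PySem.List.pyGetD s i ' ')|))
  | 0, _, fl, sub => by
      simp [show PySem.List.pyRange 0 (0 : Int) = [] from by simp]
  | m + 1, hm, fl, sub => by
      have h1 : ((m + 1 : Nat) : Int) = (m : Int) + 1 := by push_cast; ring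
      rw [h1, PySem.List.pyRange_one_succ_right (by positivity), List.foldl_append, List.map_append,
        pv_accum s c m (by omega) fl sub]
      simp
      omega

theorem pv_inner (s : List Char) (c : Char) (hs : s ≠ []) (fl : List Int) :
    (PySem.List.pyRange 0 (s.length : Int)).foldl
      (fun st i =>
        let sub := st.2 ++ [|pyInt1 (PySem.List.pyGetD (List.replicate s.length c) i ' ') -
          pyInt1 (PySem.List.pyGetD s i ' ')|]
        if i == ((List.replicate s.length c).length : Int) - 1 then (st.1 ++ [sub.sum], ([] : List Int))
        else (st.1, sub))
      (fl, [])
    = (fl ++ [(s.map (fun x => |pyInt1 c - pyInt1 x|)).sum], []) := by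
  have hn : 1 ≤ s.length := List.length_pos_iff.mpr hs
  have h1 : (s.length : Int) = ((s.length - 1 : Nat) : Int) + 1 := by omega
  have hmap : (PySem.List.pyRange 0 (s.length : Int)).map
      (fun i => |pyInt1 (PySem.List.pyGetD (List.replicate s.length c) i ' ') -
        pyInt1 (PySem.List.pyGetD s i ' ')|)
      = s.map (fun x => |pyInt1 c - pyInt1 x|) := by
    have hcongr : (PySem.List.pyRange 0 (s.length : Int)).map
        (fun i => |pyInt1 (PySem.List.pyGetD (List.replicate s.length c) i ' ') -
          pyInt1 (PySem.List.pyGetD s i ' ')|)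
        = (PySem.List.pyRange 0 (s.length : Int)).map
          (fun i => |pyInt1 c - pyInt1 (PySem.List.pyGetD s i ' ')|) := by
      apply List.map_congr_left
      intro i hi
      rw [PySem.List.mem_pyRange_one] at hi
      rw [PySem.List.pyGetD_eq_getElem (List.replicate s.length c) ' ' hi.1
        (by simpa using hi.2), List.getElem_replicate]
    rw [hcongr]
    have hlen : (s.length : Int) = PySem.List.len s := by simp [PySem.List.len]
    calc (PySem.List.pyRange 0 (s.length : Int)).map
          (fun i => |pyInt1 c - pyInt1 (PySem.List.pyGetD s i ' ')|)
        = ((PySem.List.pyRange 0 (s.length : Int)).map (fun j => PySem.List.pyGetD s j ' ')).map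
            (fun x => |pyInt1 c - pyInt1 x|) := by
          rw [List.map_map]; rfl
      _ = s.map (fun x => |pyInt1 c - pyInt1 x|) := by
          rw [hlen, PySem.List.map_pyGetD_pyRange_zero]
  have hsplit : (PySem.List.pyRange 0 ((s.length - 1 : Nat) : Int)).map
        (fun i => |pyInt1 (PySem.List.pyGetD (List.replicate s.length c) i ' ') -
          pyInt1 (PySem.List.pyGetD s i ' ')|)
      ++ [|pyInt1 (PySem.List.pyGetD (List.replicate s.length c) ((s.length - 1 : Nat) : Int) ' ') -
          pyInt1 (PySem.List.pyGetD s ((s.length - 1 : Nat) : Int) ' ')|]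
      = s.map (fun x => |pyInt1 c - pyInt1 x|) := by
    rw [← hmap, h1, PySem.List.pyRange_one_succ_right (by positivity), List.map_append]
    simp
  rw [h1, PySem.List.pyRange_one_succ_right (by positivity), List.foldl_append,
    pv_accum s c (s.length - 1) (by omega) fl []]
  have heq : ((((s.length - 1 : Nat) : Int)) == ((List.replicate s.length c).length : Int) - 1) = true := by
    simp only [List.length_replicate, beq_iff_eq]
    omega
  simp only [List.nil_append, List.foldl_cons, List.foldl_nil, heq, if_true]
  rw [hsplit]

theorem pv_sum_counter (l : List Char) (f : Char → Int) :
    ((PySem.Set.ofList l).map (fun g => (l.count g : Int) * f g)).sum = (l.map f).sum := by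
  have h1 := (List.sum_toFinset (fun g => (l.count g : Int) * f g) (PySem.Set.nodup_ofList l)).symm
  have h2 : (PySem.Set.ofList l).toFinset = l.toFinset := by
    ext x; simp [List.mem_toFinset, PySem.Set.mem_ofList]
  rw [h1, h2]
  have h3 := Finset.sum_multiset_map_count (l : Multiset Char) f
  simp only [Multiset.coe_count, Multiset.map_coe, Multiset.sum_coe, nsmul_eq_mul] at h3
  rw [h3]
  rfl


-- ===== VERDICT (by name: the statement is the Claim_ definition above) =====
theorem smallest_transform_spec : Claim_equal_smallest_transform := by
  intro num _ _
  unfold Spec_smallest_transform smallest_transform smallest_transform_alt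
  simp only [PySem.Dict.foldl_insert_getD_add_one_eq_counter, PySem.Dict.keys_counter,
    PySem.Dict.items_counter, List.map_map, List.map_const']
  set s := PySem.Int.toChars num with hsdef
  have hs : s ≠ [] := pv_toChars_ne_nil num
  -- the candidates list: zip of maps collapses to a single map over the distinct characters
  have hlen : (PySem.Set.ofList s).length ≤
      (PySem.List.pyRange 0 (((PySem.Set.ofList s).map (fun c => List.replicate s.length c)).length : Int)).length := by
    rw [List.length_map, PySem.List.pyRange_zero_natCast, List.length_map, List.length_range]
  rw [pv_zip_map (fun c => List.replicate s.length c) s (PySem.Set.ofList s) _ hlen, List.foldl_map]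
  rw [pv_foldl_pair _ (fun c => (s.map (fun x => |pyInt1 c - pyInt1 x|)).sum)
    (fun fl c => by simpa using pv_inner s c hs fl) (PySem.Set.ofList s) []]
  simp only [List.nil_append]
  have h : ∀ c ∈ PySem.Set.ofList s,
      (s.map (fun x => |pyInt1 c - pyInt1 x|)).sum
      = ((PySem.Set.ofList s).map
          ((fun p : Char × Int => p.2 * |pyInt1 p.1 - pyInt1 c|) ∘ fun k => (k, (s.count k : Int)))).sum := by
    intro c _
    have hcomp : ((PySem.Set.ofList s).map
          ((fun p : Char × Int => p.2 * |pyInt1 p.1 - pyInt1 c|) ∘ fun k => (k, (s.count k : Int))))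
        = (PySem.Set.ofList s).map (fun g => (s.count g : Int) * |pyInt1 g - pyInt1 c|) := by
      simp [Function.comp]
    rw [hcomp, pv_sum_counter s (fun g => |pyInt1 g - pyInt1 c|)]
    congr 1
    exact List.map_congr_left (fun x _ => abs_sub_comm _ _)
  exact congrArg (fun l => (PySem.List.min? l id).getD 0) (List.map_congr_left h)
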